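-- pv_equiv track=rewrite | github.com/namel3ss-Ai/namel3ss | src/namel3ss/lang/capabilities.py | normalize_capability_tokens
-- ===== SOURCE A (Python) =====
-- BUILTIN_CAPABILITIES = (
--     "http",
--     "jobs",
--     "files",
--     "scheduling",
--     "uploads",
--     "secrets",
--     "embedding",
--     "vision",
--     "speech",
--     "huggingface",
--     "local_runner",
--     "vision_gen",
--     "third_party_apis",
--     "dependency_management",
--     "training",
--     "streaming",
--     "performance",
--     "versioning_quality_mlops",
--     "performance_scalability",
--     "decoupled_ui_api",
--     "ecosystem_developer_experience",
--     "security_compliance",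
--     "custom_ui",
--     "ui.custom_layouts",
--     "ui.rag_patterns",
--     "ui.theming",
--     "ui.i18n",
--     "ui.plugins",
--     "ui.slider",
--     "ui.tooltip",
--     "ui.citations_enhanced",
--     "composition.includes",
--     "diagnostics.trace",
--     "ui_layout",
--     "ui_rag",
--     "ui_theme",
--     "ui_navigation",
--     "ui_state",
--     "app_permissions",
--     "app_packaging",
--     "custom_theme",
--     "theme_editor",
--     "dev_tools",
--     "plugin_registry",
--     "responsive_design",
--     "sandbox",
--     "service",
--     "multi_user",
--     "remote_studio",
--     "extension_hooks",
--     "hook_execution",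
--     "extension_trust",
--     "remote_registry",
-- )
--
-- def normalize_builtin_capability(name: str | None) -> str | None:
--     if not isinstance(name, str):
--         return None
--     value = name.strip().lower()
--     if value in BUILTIN_CAPABILITIES:
--         return value
--     return None
--
-- def normalize_capability_tokens(values: tuple[str, ...] | list[str] | set[str] | None) -> tuple[str, ...]:
--     if not values:
--         return ()
--     normalized: list[str] = []
--     for item in values:
--         token = normalize_builtin_capability(item if isinstance(item, str) else None)
--         if token is not None:
--             normalized.append(token)
--     return tuple(sorted(set(normalized)))
-- ===== SOURCE B (Python) =====
-- # Allowed capabilities, pre-sorted, kept as one space-separated string.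
-- _SORTED_CAPS = (
--     "app_packaging app_permissions composition.includes custom_theme custom_ui "
--     "decoupled_ui_api dependency_management dev_tools diagnostics.trace "
--     "ecosystem_developer_experience embedding extension_hooks extension_trust "
--     "files hook_execution http huggingface jobs local_runner multi_user "
--     "performance performance_scalability plugin_registry remote_registry "
--     "remote_studio responsive_design sandbox scheduling secrets "
--     "security_compliance service speech streaming theme_editor "
--     "third_party_apis training ui.citations_enhanced ui.custom_layouts "
--     "ui.i18n ui.plugins ui.rag_patterns ui.slider ui.theming ui.tooltip "
--     "ui_layout ui_navigation ui_rag ui_state ui_theme uploads "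
--     "versioning_quality_mlops vision vision_gen"
-- ).split()
--
-- def normalize_capability_tokens(values):
--     vs = values or ()
--     return tuple(
--         c for c in _SORTED_CAPS
--         if any(isinstance(v, str) and v.strip().lower() == c for v in vs)
--     )
-- ===== Notes on version B (the rewrite author's own statement) =====
-- stated objective: alternative
-- what changed: B inverts the traversal: instead of normalizing each input item, testing it against the allowed set, deduplicating and sorting, B walks a pre-sorted constant list of allowed capabilities (stored as one space-separated string, split once) and keeps each capability that some input item normalizes to, so no per-call set, dedup or sort is needed.
import Mathlib
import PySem

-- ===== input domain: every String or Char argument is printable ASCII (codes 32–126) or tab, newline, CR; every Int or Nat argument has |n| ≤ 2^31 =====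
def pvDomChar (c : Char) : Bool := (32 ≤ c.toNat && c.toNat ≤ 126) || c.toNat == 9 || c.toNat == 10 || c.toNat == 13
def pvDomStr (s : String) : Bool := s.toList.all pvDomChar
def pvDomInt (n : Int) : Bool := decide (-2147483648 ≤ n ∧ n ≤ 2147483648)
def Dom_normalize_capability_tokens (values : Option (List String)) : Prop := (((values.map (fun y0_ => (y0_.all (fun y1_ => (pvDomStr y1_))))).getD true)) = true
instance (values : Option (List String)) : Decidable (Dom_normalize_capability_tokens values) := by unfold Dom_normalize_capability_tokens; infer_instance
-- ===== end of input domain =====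

-- B inverts the traversal: it walks a pre-sorted constant list of allowed capabilities and keeps
-- each one that some input item normalizes to, so no per-call set, dedup or sort is needed.

-- ===== PORT A =====
-- A's module constant
def BUILTIN_CAPABILITIES : List String :=
  ["http", "jobs", "files", "scheduling", "uploads", "secrets", "embedding",
   "vision", "speech", "huggingface", "local_runner", "vision_gen",
   "third_party_apis", "dependency_management", "training", "streaming",
   "performance", "versioning_quality_mlops", "performance_scalability",
   "decoupled_ui_api", "ecosystem_developer_experience", "security_compliance",
   "custom_ui", "ui.custom_layouts", "ui.rag_patterns", "ui.theming",
   "ui.i18n", "ui.plugins", "ui.slider", "ui.tooltip",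
   "ui.citations_enhanced", "composition.includes", "diagnostics.trace",
   "ui_layout", "ui_rag", "ui_theme", "ui_navigation", "ui_state",
   "app_permissions", "app_packaging", "custom_theme", "theme_editor",
   "dev_tools", "plugin_registry", "responsive_design", "sandbox", "service",
   "multi_user", "remote_studio", "extension_hooks", "hook_execution",
   "extension_trust", "remote_registry"]

-- (the `isinstance(name, str)` branch is vacuous under the type convention: every item is a String)
def normalize_builtin_capability (name : String) : Option String :=
  if PySem.Str.lower (PySem.Str.strip name) ∈ BUILTIN_CAPABILITIES then
    some (PySem.Str.lower (PySem.Str.strip name))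
  else none

def normalize_capability_tokens (values : Option (List String)) : List String :=
  match values with
  | none => []
  | some vs =>
    if vs = [] then []
    else
      let normalized : List String := vs.foldl (fun acc item =>
        match normalize_builtin_capability item with
        | some token => acc ++ [token]
        | none => acc) []
      PySem.List.sorted (PySem.Set.ofList normalized) (fun x => x) false

-- ===== PORT B =====
-- Source B's module constant: the allowed capabilities, pre-sorted, one space-separated string split once
def SORTED_CAPS : List String := PySem.Str.split₀
  "app_packaging app_permissions composition.includes custom_theme custom_ui decoupled_ui_api dependency_management dev_tools diagnostics.trace ecosystem_developer_experience embedding extension_hooks extension_trust files hook_execution http huggingface jobs local_runner multi_user performance performance_scalability plugin_registry remote_registry remote_studio responsive_design sandbox scheduling secrets security_compliance service speech streaming theme_editor third_party_apis training ui.citations_enhanced ui.custom_layouts ui.i18n ui.plugins ui.rag_patterns ui.slider ui.theming ui.tooltip ui_layout ui_navigation ui_rag ui_state ui_theme uploads versioning_quality_mlops vision vision_gen"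

def normalize_capability_tokens_alt (values : Option (List String)) : List String :=
  let vs := values.getD []
  SORTED_CAPS.filter (fun c => vs.any (fun v => PySem.Str.lower (PySem.Str.strip v) == c))

-- ===== PRECONDITION & SPEC =====
def Spec_normalize_capability_tokens (values : Option (List String)) (out : List String) : Prop := out = normalize_capability_tokens_alt values
instance (values : Option (List String)) (out : List String) : Decidable (Spec_normalize_capability_tokens values out) := by unfold Spec_normalize_capability_tokens; infer_instance

-- ===== CLAIM (what is proved, stated in full; the proofs are below) =====
def Claim_equal_normalize_capability_tokens : Prop := ∀ (values : Option (List String)), Dom_normalize_capability_tokens values → Spec_normalize_capability_tokens values (normalize_capability_tokens values)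

-- ===== LEMMAS AND PROOFS =====

-- A's append loop is filterMap of the normalizer
lemma foldl_norm_eq_filterMap (vs : List String) (acc : List String) :
    vs.foldl (fun acc item =>
        match normalize_builtin_capability item with
        | some token => acc ++ [token]
        | none => acc) acc
      = acc ++ vs.filterMap normalize_builtin_capability := by
  induction vs generalizing acc with
  | nil => simp
  | cons v vs ih =>
    simp only [List.foldl_cons, List.filterMap_cons]
    cases h : normalize_builtin_capability v <;> simp [ih]

lemma mem_norm_iff (x v : String) :
    normalize_builtin_capability v = some x ↔
      x ∈ BUILTIN_CAPABILITIES ∧ x = PySem.Str.lower (PySem.Str.strip v) := by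
  unfold normalize_builtin_capability
  by_cases h : PySem.Str.lower (PySem.Str.strip v) ∈ BUILTIN_CAPABILITIES
  · rw [if_pos h]
    constructor
    · intro hx
      have : PySem.Str.lower (PySem.Str.strip v) = x := Option.some.inj hx
      exact ⟨this ▸ h, this.symm⟩
    · rintro ⟨-, rfl⟩; rfl
  · rw [if_neg h]
    constructor
    · rintro ⟨⟩
    · rintro ⟨hx, rfl⟩; exact absurd hx h

set_option maxRecDepth 8000 in
set_option maxHeartbeats 4000000 in
lemma caps_eq : SORTED_CAPS = ["app_packaging", "app_permissions", "composition.includes", "custom_theme", "custom_ui", "decoupled_ui_api", "dependency_management", "dev_tools", "diagnostics.trace", "ecosystem_developer_experience", "embedding", "extension_hooks", "extension_trust", "files", "hook_execution", "http", "huggingface", "jobs", "local_runner", "multi_user", "performance", "performance_scalability", "plugin_registry", "remote_registry", "remote_studio", "responsive_design", "sandbox", "scheduling", "secrets", "security_compliance", "service", "speech", "streaming", "theme_editor", "third_party_apis", "training", "ui.citations_enhanced", "ui.custom_layouts", "ui.i18n", "ui.plugins", "ui.rag_patterns", "ui.slider", "ui.theming", "ui.tooltip", "ui_layout", "ui_navigation",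 "ui_rag", "ui_state", "ui_theme", "uploads", "versioning_quality_mlops", "vision", "vision_gen"] := by decide

set_option maxRecDepth 8000 in
lemma sorted_caps_pairwise_lt : SORTED_CAPS.Pairwise (· < ·) := by
  rw [caps_eq]
  simp only [String.lt_iff_toList_lt]
  decide

lemma sorted_caps_nodup : SORTED_CAPS.Nodup :=
  sorted_caps_pairwise_lt.imp (fun h => ne_of_lt h)

set_option maxRecDepth 8000 in
lemma sorted_caps_perm : SORTED_CAPS.Perm BUILTIN_CAPABILITIES := by rw [caps_eq]; decide

lemma mem_sorted_caps (x : String) : x ∈ SORTED_CAPS ↔ x ∈ BUILTIN_CAPABILITIES :=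
  sorted_caps_perm.mem_iff

lemma key_lemma (vs : List String) :
    PySem.List.sorted
        (PySem.Set.ofList (vs.filterMap normalize_builtin_capability)) (fun x => x) false
      = SORTED_CAPS.filter (fun c => vs.any (fun v => PySem.Str.lower (PySem.Str.strip v) == c)) := by
  apply PySem.List.sorted_eq_of_perm_of_pairwise_lt
  · -- permutation: same elements, both nodup
    have hnd1 : (SORTED_CAPS.filter
        (fun c => vs.any (fun v => PySem.Str.lower (PySem.Str.strip v) == c))).Nodup :=
      sorted_caps_nodup.filter _
    have hnd2 : (PySem.Set.ofList (vs.filterMap normalize_builtin_capability) : List String).Nodup :=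
      PySem.Set.nodup_ofList _
    rw [List.perm_ext_iff_of_nodup hnd1 hnd2]
    intro x
    simp only [List.mem_filter, PySem.Set.mem_ofList, List.mem_filterMap,
      List.any_eq_true, beq_iff_eq, mem_sorted_caps]
    constructor
    · rintro ⟨hb, v, hv, rfl⟩
      exact ⟨v, hv, (mem_norm_iff _ v).mpr ⟨hb, rfl⟩⟩
    · rintro ⟨v, hv, hnv⟩
      obtain ⟨hb, rfl⟩ := (mem_norm_iff _ v).mp hnv
      exact ⟨hb, v, hv, rfl⟩
  · exact sorted_caps_pairwise_lt.filter _

-- ===== VERDICT (by name: the statement is the Claim_ definition above) =====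
theorem normalize_capability_tokens_spec : Claim_equal_normalize_capability_tokens := by
  intro values _
  unfold Spec_normalize_capability_tokens normalize_capability_tokens normalize_capability_tokens_alt
  match values with
  | none => simp
  | some vs =>
    by_cases h : vs = []
    · subst h; simp
    · simp only [h, if_false, Option.getD_some]
      rw [foldl_norm_eq_filterMap, List.nil_append, key_lemma]
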